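-- pv_equiv track=rewrite | github.com/James-Wachuka/dataquest_DE_learningpath | algorithm-complexity/Constant Time Complexity-477.py | append_N_list_cost
-- ===== SOURCE A (Python) =====
-- def append_cost(array_length, list_length):
--     if array_length == list_length:
--         return array_length
--     return 1
--
-- def append_N_list_cost(N):
--     array_length = 1  # initially the array will have length 1
--     list_length = 0  # initially the list has 0 elements
--     total_cost = 0  # this variable will keep track of the total cost
--     for i in range(N):
--         cost = append_cost(array_length, list_length)
--         total_cost += cost
--         # update the array and list lengths
--         if array_length == list_length:
--             array_length *= 2
--         list_length += 1
--     return total_cost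
-- ===== SOURCE B (Python) =====
-- def append_N_list_cost(N):
--     # Each of the N appends costs one unit, except the doubling appends:
--     # at each power of two p strictly below N (starting from the first
--     # doubling) the append costs p instead, contributing an extra p - 1.
--     if N <= 0:
--         return 0
--     total = N
--     p = 2
--     while p < N:
--         total += p - 1
--         p *= 2
--     return total
-- ===== Notes on version B (the rewrite author's own statement) =====
-- stated objective: faster
-- what changed: Replaces the step-by-step simulation of all N appends by a geometric-series loop over only the powers of two below N (a doubling append at such a power p costs p instead of a unit, so the total is N plus the sum of the extra costs p-1).
import Mathlib
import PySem

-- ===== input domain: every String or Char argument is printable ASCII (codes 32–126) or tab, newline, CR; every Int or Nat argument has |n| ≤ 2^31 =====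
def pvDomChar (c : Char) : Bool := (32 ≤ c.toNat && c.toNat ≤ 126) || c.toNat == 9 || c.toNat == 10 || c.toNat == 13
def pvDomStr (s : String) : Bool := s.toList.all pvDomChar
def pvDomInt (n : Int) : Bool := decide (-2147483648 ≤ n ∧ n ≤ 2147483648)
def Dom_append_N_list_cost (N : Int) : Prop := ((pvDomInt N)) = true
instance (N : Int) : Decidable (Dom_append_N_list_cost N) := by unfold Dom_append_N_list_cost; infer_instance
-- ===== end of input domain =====

-- B replaces A's step-by-step append simulation by a loop over only the
-- powers of two below N (each doubling append at such a power p costs p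
-- instead of a unit, an extra p-1); objective: faster (measured).


-- ===== PORT A =====
def append_cost (array_length list_length : Int) : Int :=
  if array_length == list_length then array_length else 1

def append_N_list_cost (N : Int) : Int :=
  -- for i in range(N): accumulate (array_length, list_length, total_cost)
  (PySem.List.pyRange 0 N 1).foldl
    (fun (st : Int × Int × Int) _ =>
      let cost := append_cost st.1 st.2.1
      let total := st.2.2 + cost
      let arr := if st.1 == st.2.1 then st.1 * 2 else st.1
      (arr, st.2.1 + 1, total))
    (1, 0, 0) |>.2.2

-- ===== PORT B =====
-- while p < N: total += p - 1; p *= 2   (the '0 < p' conjunct only makes the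
-- recursion total in Lean; B always calls it with p = 2 > 0)
def bLoop (N p total : Int) : Int :=
  if h : 0 < p ∧ p < N then bLoop N (2 * p) (total + (p - 1)) else total
termination_by (N - p).toNat
decreasing_by omega

def append_N_list_cost_alt (N : Int) : Int :=
  if N ≤ 0 then 0 else bLoop N 2 N

-- ===== PRECONDITION & SPEC =====
def Spec_append_N_list_cost (N : Int) (out : Int) : Prop := out = append_N_list_cost_alt N
instance (N : Int) (out : Int) : Decidable (Spec_append_N_list_cost N out) := by unfold Spec_append_N_list_cost; infer_instance

-- ===== CLAIM (what is proved, stated in full; the proofs are below) =====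
def Claim_equal_append_N_list_cost : Prop := ∀ (N : Int), Dom_append_N_list_cost N → Spec_append_N_list_cost N (append_N_list_cost N)

-- ===== LEMMAS AND PROOFS =====

-- The common closed form: after n simulated appends the total cost is
-- n + 2^(clog 2 n) - 1 - clog 2 n, and the array length is 2^(clog 2 n).
-- A's loop state after n iterations.
lemma loopA_state (n : Nat) :
    (List.range n).foldl
      (fun (st : Int × Int × Int) _ =>
        let cost := append_cost st.1 st.2.1
        let total := st.2.2 + cost
        let arr := if st.1 == st.2.1 then st.1 * 2 else st.1
        (arr, st.2.1 + 1, total))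
      (1, 0, 0)
    = ((2 : Int) ^ (Nat.clog 2 n), (n : Int),
       (n : Int) + 2 ^ (Nat.clog 2 n) - 1 - (Nat.clog 2 n : Int)) := by
  induction n with
  | zero => simp [Nat.clog]
  | succ n ih =>
    rw [List.range_succ, List.foldl_append, ih]
    simp only [List.foldl_cons, List.foldl_nil, append_cost]
    by_cases hc : (2 : Int) ^ (Nat.clog 2 n) = (n : Int)
    · -- doubling step: n = 2^c, clog 2 (n+1) = c + 1
      have hn : n = 2 ^ (Nat.clog 2 n) := by exact_mod_cast hc.symm
      have h1 : 1 ≤ n := by rw [hn]; exact Nat.one_le_two_pow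
      have hlt : Nat.clog 2 n < Nat.clog 2 (n + 1) :=
        (Nat.lt_clog_iff_pow_lt one_lt_two).2 (by omega)
      have hle : Nat.clog 2 (n + 1) ≤ Nat.clog 2 n + 1 :=
        (Nat.clog_le_iff_le_pow one_lt_two).2 (by rw [pow_succ]; omega)
      have hclog : Nat.clog 2 (n + 1) = Nat.clog 2 n + 1 := by omega
      simp only [hc, beq_self_eq_true, if_true, hclog, Prod.mk.injEq]
      push_cast
      rw [pow_succ, hc]
      refine ⟨by ring, by ring, by ring⟩
    · -- plain step: clog 2 (n+1) = clog 2 n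
      have hne : ((2 : Int) ^ (Nat.clog 2 n) == (n : Int)) = false := by
        simp [hc]
      have hge : n ≤ 2 ^ (Nat.clog 2 n) := Nat.le_pow_clog one_lt_two n
      have hlt : n < 2 ^ (Nat.clog 2 n) := by
        rcases lt_or_eq_of_le hge with h | h
        · exact h
        · exact absurd (by exact_mod_cast congrArg (Nat.cast : Nat → Int) h.symm) hc
      have hle : Nat.clog 2 (n + 1) ≤ Nat.clog 2 n :=
        (Nat.clog_le_iff_le_pow one_lt_two).2 (by omega)
      have hmono : Nat.clog 2 n ≤ Nat.clog 2 (n + 1) :=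
        Nat.clog_mono_right 2 (by omega)
      have hclog : Nat.clog 2 (n + 1) = Nat.clog 2 n := by omega
      simp only [hne, if_false, Bool.false_eq_true, hclog, Prod.mk.injEq]
      push_cast
      refine ⟨trivial, rfl, by ring⟩

-- B's loop, at p = 2^j, adds the geometric tail between j and m = clog 2 N.toNat.
lemma loopB_value (N : Int) (hN : 1 ≤ N) (k : Nat) :
    ∀ (j : Nat) (acc : Int), Nat.clog 2 N.toNat ≤ j + k →
      bLoop N (2 ^ j) acc
        = acc + 2 ^ (max (Nat.clog 2 N.toNat) j) - 2 ^ j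
            - (((max (Nat.clog 2 N.toNat) j : Nat) : Int) - (j : Int)) := by
  induction k with
  | zero =>
    intro j acc hjk
    have hmax : max (Nat.clog 2 N.toNat) j = j := by omega
    have hstop : ¬ ((2 : Int) ^ j < N) := by
      have : N.toNat ≤ 2 ^ j := (Nat.clog_le_iff_le_pow one_lt_two).1 (by omega)
      have hN' : N = (N.toNat : Int) := by omega
      rw [hN']; exact_mod_cast not_lt.2 this
    rw [bLoop, dif_neg (fun h => hstop h.2)]
    rw [hmax]
    ring
  | succ k ih =>
    intro j acc hjk
    by_cases hm : Nat.clog 2 N.toNat ≤ j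
    · -- loop already finished (same as the base case)
      have hmax : max (Nat.clog 2 N.toNat) j = j := by omega
      have hstop : ¬ ((2 : Int) ^ j < N) := by
        have : N.toNat ≤ 2 ^ j := (Nat.clog_le_iff_le_pow one_lt_two).1 hm
        have hN' : N = (N.toNat : Int) := by omega
        rw [hN']; exact_mod_cast not_lt.2 this
      rw [bLoop, dif_neg (fun h => hstop h.2)]
      rw [hmax]
      ring
    · -- 2^j < N: one more iteration
      rw [not_le] at hm
      have hlt : (2 : Nat) ^ j < N.toNat := (Nat.lt_clog_iff_pow_lt one_lt_two).1 hm
      have hltI : (2 : Int) ^ j < N := by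
        have hN' : N = (N.toNat : Int) := by omega
        rw [hN']; exact_mod_cast hlt
      have hpos : (0 : Int) < 2 ^ j := by positivity
      rw [bLoop, dif_pos ⟨hpos, hltI⟩]
      have : (2 : Int) * 2 ^ j = 2 ^ (j + 1) := by rw [pow_succ]; ring
      rw [this, ih (j + 1) (acc + (2 ^ j - 1)) (by omega)]
      have hmax1 : max (Nat.clog 2 N.toNat) (j + 1) = Nat.clog 2 N.toNat := by omega
      have hmax2 : max (Nat.clog 2 N.toNat) j = Nat.clog 2 N.toNat := by omega
      rw [hmax1, hmax2]
      push_cast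
      rw [pow_succ]
      ring

lemma altA_closed (N : Int) (hN : 1 ≤ N) :
    append_N_list_cost N
      = N + 2 ^ (Nat.clog 2 N.toNat) - 1 - (Nat.clog 2 N.toNat : Int) := by
  unfold append_N_list_cost
  rw [PySem.List.pyRange_one, List.foldl_map]
  have hN' : (N - 0).toNat = N.toNat := by omega
  rw [hN', loopA_state N.toNat]
  have : ((N.toNat : Int)) = N := by omega
  simp [this]

lemma altB_closed (N : Int) (hN : 1 ≤ N) :
    append_N_list_cost_alt N
      = N + 2 ^ (Nat.clog 2 N.toNat) - 1 - (Nat.clog 2 N.toNat : Int) := by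
  unfold append_N_list_cost_alt
  rw [if_neg (by omega)]
  have h2 : (2 : Int) = 2 ^ (1 : Nat) := by norm_num
  rw [h2, loopB_value N hN (Nat.clog 2 N.toNat) 1 N (by omega)]
  by_cases hm : Nat.clog 2 N.toNat ≤ 1
  · -- N = 1 or N = 2: max = 1
    have hmax : max (Nat.clog 2 N.toNat) 1 = 1 := by omega
    rw [hmax]
    -- show the closed form agrees for clog ∈ {0, 1}
    interval_cases h : Nat.clog 2 N.toNat <;> norm_num; omega
  · have hmax : max (Nat.clog 2 N.toNat) 1 = Nat.clog 2 N.toNat := by omega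
    rw [hmax]; ring

-- ===== VERDICT (by name: the statement is the Claim_ definition above) =====
theorem append_N_list_cost_spec : Claim_equal_append_N_list_cost := by
  intro N _
  unfold Spec_append_N_list_cost
  by_cases hN : N ≤ 0
  · unfold append_N_list_cost append_N_list_cost_alt
    rw [PySem.List.pyRange_one_eq_nil (by omega), if_pos hN]
    simp
  · rw [altA_closed N (by omega), altB_closed N (by omega)]
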